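-- pv_equiv track=rewrite | github.com/GTJasonMK/AFN | backend/app/services/part_outline/parser.py | _detect_truncation
-- ===== SOURCE A (Python) =====
-- def _detect_truncation(text: str) -> bool:
--     """
--     检测JSON是否被截断
--
--     通过检查括号是否匹配来判断
--     """
--     if not text:
--         return False
--
--     # 统计括号
--     brace_count = 0  # {}
--     bracket_count = 0  # []
--     in_string = False
--     escape_next = False
--
--     for char in text:
--         if escape_next:
--             escape_next = False
--             continue
--         if char == '\\' and in_string:
--             escape_next = True
--             continue
--         if char == '"' and not escape_next:
--             in_string = not in_string
--             continue
--         if in_string: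
--             continue
--
--         if char == '{':
--             brace_count += 1
--         elif char == '}':
--             brace_count -= 1
--         elif char == '[':
--             bracket_count += 1
--         elif char == ']':
--             bracket_count -= 1
--
--     # 如果括号不匹配，说明被截断
--     return brace_count != 0 or bracket_count != 0 or in_string
-- ===== SOURCE B (Python) =====
-- def _detect_truncation(text: str) -> bool:
--     if not text:
--         return False
--     # Pass 1: extract every character that lies outside string literals.
--     code = []
--     in_string = False
--     escape_next = False
--     for char in text:
--         if escape_next:
--             escape_next = False
--         elif char == '\\' and in_string:
--             escape_next = True
--         elif char == '"':
--             in_string = not in_string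
--         elif not in_string:
--             code.append(char)
--     code = ''.join(code)
--     # Pass 2: bracket balance is just a count comparison on the filtered text.
--     return (code.count('{') != code.count('}')
--             or code.count('[') != code.count(']')
--             or in_string)
-- ===== Notes on version B (the rewrite author's own statement) =====
-- stated objective: alternative
-- what changed: B separates the work into two phases: a scanner that only handles string-literal/escape state and emits the out-of-string characters, followed by plain count() comparisons of the four bracket characters on that filtered text, replacing A's single loop that interleaves state tracking with four counter branches.
import Mathlib
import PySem

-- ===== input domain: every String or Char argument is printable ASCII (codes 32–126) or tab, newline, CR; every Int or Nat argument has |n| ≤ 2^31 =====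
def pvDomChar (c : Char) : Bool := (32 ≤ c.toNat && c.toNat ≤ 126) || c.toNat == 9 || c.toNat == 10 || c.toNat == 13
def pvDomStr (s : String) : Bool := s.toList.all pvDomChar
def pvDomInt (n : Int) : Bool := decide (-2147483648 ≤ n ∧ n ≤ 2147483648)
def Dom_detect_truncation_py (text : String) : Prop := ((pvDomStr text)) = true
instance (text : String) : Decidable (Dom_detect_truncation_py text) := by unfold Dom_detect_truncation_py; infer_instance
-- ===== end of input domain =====

-- B replaces A's single loop (string-state tracking interleaved with four bracket counters)
-- by a scanner that emits the out-of-string characters followed by count comparisons on them.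

-- ===== PORT A =====
-- state: (brace_count, bracket_count, in_string, escape_next)
def pvALoop : List Char → Int × Int × Bool × Bool → Int × Int × Bool × Bool
  | [], st => st
  | c :: cs, (b, k, s, e) =>
    if e then pvALoop cs (b, k, s, false)
    else if c = '\\' ∧ s then pvALoop cs (b, k, s, true)
    else if c = '"' ∧ ¬ e then pvALoop cs (b, k, !s, e)
    else if s then pvALoop cs (b, k, s, e)
    else if c = '{' then pvALoop cs (b + 1, k, s, e)
    else if c = '}' then pvALoop cs (b - 1, k, s, e)
    else if c = '[' then pvALoop cs (b, k + 1, s, e)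
    else if c = ']' then pvALoop cs (b, k - 1, s, e)
    else pvALoop cs (b, k, s, e)

def detect_truncation_py (text : String) : Bool :=
  if text = "" then false
  else
    let (b, k, s, _) := pvALoop text.toList (0, 0, false, false)
    b != 0 || k != 0 || s

-- ===== PORT B =====
-- scanner: returns (characters outside string literals, final in_string)
def pvBScan : List Char → Bool → Bool → List Char × Bool
  | [], s, _ => ([], s)
  | c :: cs, s, e =>
    if e then pvBScan cs s false
    else if c = '\\' ∧ s then pvBScan cs s true
    else if c = '"' then pvBScan cs (!s) e
    else if s then pvBScan cs s e
    else (c :: (pvBScan cs s e).1, (pvBScan cs s e).2)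

def detect_truncation_py_alt (text : String) : Bool :=
  if text = "" then false
  else
    let (code, s) := pvBScan text.toList false false
    code.count '{' != code.count '}' || code.count '[' != code.count ']' || s

-- ===== PRECONDITION & SPEC =====
def Spec_detect_truncation_py (text : String) (out : Bool) : Prop := out = detect_truncation_py_alt text
instance (text : String) (out : Bool) : Decidable (Spec_detect_truncation_py text out) := by unfold Spec_detect_truncation_py; infer_instance

-- ===== CLAIM (what is proved, stated in full; the proofs are below) =====
def Claim_equal_detect_truncation_py : Prop := ∀ (text : String), Dom_detect_truncation_py text → Spec_detect_truncation_py text (detect_truncation_py text)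

-- ===== LEMMAS AND PROOFS =====

theorem pvLoop_scan (cs : List Char) : ∀ (b k : Int) (s e : Bool),
    (pvALoop cs (b, k, s, e)).1
      = b + ((pvBScan cs s e).1.count '{' : Int) - ((pvBScan cs s e).1.count '}' : Int)
  ∧ (pvALoop cs (b, k, s, e)).2.1
      = k + ((pvBScan cs s e).1.count '[' : Int) - ((pvBScan cs s e).1.count ']' : Int)
  ∧ (pvALoop cs (b, k, s, e)).2.2.1 = (pvBScan cs s e).2 := by
  induction cs with
  | nil => intro b k s e; simp [pvALoop, pvBScan]
  | cons c cs ih =>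
    intro b k s e
    simp only [pvALoop, pvBScan]
    by_cases he : e = true
    · simp only [if_pos he]; exact ih b k s false
    · simp only [if_neg he]
      by_cases hbs : c = '\\' ∧ s = true
      · simp only [if_pos hbs]; exact ih b k s true
      · simp only [if_neg hbs]
        by_cases hq : c = '"'
        · have hq2 : c = '"' ∧ ¬ e = true := ⟨hq, he⟩
          simp only [if_pos hq2, if_pos hq]; exact ih b k (!s) e
        · have hq2 : ¬ (c = '"' ∧ ¬ e = true) := fun h => hq h.1
          simp only [if_neg hq2, if_neg hq]
          by_cases hs : s = true
          · simp only [if_pos hs]; exact ih b k s e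
          · simp only [if_neg hs]
            by_cases h1 : c = '{'
            · simp only [if_pos h1]
              obtain ⟨j1, j2, j3⟩ := ih (b + 1) k s e
              refine ⟨?_, ?_, j3⟩ <;> simp only [j1, j2] <;>
                simp [h1, List.count_cons] <;> push_cast <;> omega
            · simp only [if_neg h1]
              by_cases h2 : c = '}'
              · simp only [if_pos h2]
                obtain ⟨j1, j2, j3⟩ := ih (b - 1) k s e
                refine ⟨?_, ?_, j3⟩ <;> simp only [j1, j2] <;>
                  simp [h2, List.count_cons] <;> push_cast <;> omega
              · simp only [if_neg h2]
                by_cases h3 : c = '['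
                · simp only [if_pos h3]
                  obtain ⟨j1, j2, j3⟩ := ih b (k + 1) s e
                  refine ⟨?_, ?_, j3⟩ <;> simp only [j1, j2] <;>
                    simp [h3, List.count_cons] <;> push_cast <;> omega
                · simp only [if_neg h3]
                  by_cases h4 : c = ']'
                  · simp only [if_pos h4]
                    obtain ⟨j1, j2, j3⟩ := ih b (k - 1) s e
                    refine ⟨?_, ?_, j3⟩ <;> simp only [j1, j2] <;>
                      simp [h4, List.count_cons] <;> push_cast <;> omega
                  · simp only [if_neg h4]
                    obtain ⟨j1, j2, j3⟩ := ih b k s e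
                    refine ⟨?_, ?_, j3⟩ <;> simp only [j1, j2] <;>
                      simp [List.count_cons, h1, h2, h3, h4]

theorem bne_sub_count {c1 c2 : ℕ} : (((c1 : Int) - c2 != 0) : Bool) = (c1 != c2) := by
  by_cases h : c1 = c2
  · simp [h]
  · have h2 : (c1 : Int) - c2 ≠ 0 := by omega
    have l : (((c1 : Int) - c2 != 0) : Bool) = true := by simpa using h2
    have r : ((c1 != c2) : Bool) = true := by simpa using h
    rw [l, r]

-- ===== VERDICT (by name: the statement is the Claim_ definition above) =====
theorem detect_truncation_py_spec : Claim_equal_detect_truncation_py := by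
  intro text _
  unfold Spec_detect_truncation_py detect_truncation_py detect_truncation_py_alt
  by_cases ht : text = ""
  · simp [ht]
  · simp only [ht, if_false]
    rcases pvLoop_scan text.toList 0 0 false false with ⟨h1, h2, h3⟩
    rcases hA : pvALoop text.toList (0, 0, false, false) with ⟨b, k, s, e⟩
    rcases hB : pvBScan text.toList false false with ⟨code, s'⟩
    simp only [hA, hB] at h1 h2 h3
    simp only [h1, h2, h3]
    simp only [zero_add]
    rw [bne_sub_count, bne_sub_count]
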